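-- pv_equiv track=rewrite | github.com/Tiago-Goncalves98/Connect-N | controllers/gamerules.py | count_V_DOWN
-- ===== SOURCE A (Python) =====
-- def count_V_DOWN(game,x,y,count=1):
--     final_count = count
--     for i in range(y-1,y+2):
--         for j in range(x-1,x+2):
--             if 0 <= i < len(game["currentGame"]) and 0 <= j < len(game["currentGame"][0]) and (i == y+1 and j == x) and game["currentGame"][i][j] == game["currentGame"][y][x]:
--                 final_count += 1
--                 return count_V_DOWN(game,j,i,final_count)
--     return final_count
-- ===== SOURCE B (Python) =====
-- def count_V_DOWN(game, x, y, count=1):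
--     grid = game["currentGame"]
--     rows = len(grid)
--     cols = len(grid[0]) if rows else 0
--     while 0 <= y + 1 < rows and 0 <= x < cols and grid[y + 1][x] == grid[y][x]:
--         count += 1
--         y += 1
--     return count
-- ===== Notes on version B (the rewrite author's own statement) =====
-- stated objective: simpler
-- what changed: Replaces the tail recursion that rescans a 3x3 window (of which only the cell directly below can ever match) with a single iterative while-loop walking down the column, keeping the same guard order and the count=1 default.
-- outside the precondition, e.g. on count_V_DOWN({'currentGame': [[1], [2, 3]]}, 0, 0, 1): A returns 1, B returns 1; on count_V_DOWN({'b1': [[1]]}, 0, -3, 5): A returns 5, B raises KeyError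
import Mathlib
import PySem

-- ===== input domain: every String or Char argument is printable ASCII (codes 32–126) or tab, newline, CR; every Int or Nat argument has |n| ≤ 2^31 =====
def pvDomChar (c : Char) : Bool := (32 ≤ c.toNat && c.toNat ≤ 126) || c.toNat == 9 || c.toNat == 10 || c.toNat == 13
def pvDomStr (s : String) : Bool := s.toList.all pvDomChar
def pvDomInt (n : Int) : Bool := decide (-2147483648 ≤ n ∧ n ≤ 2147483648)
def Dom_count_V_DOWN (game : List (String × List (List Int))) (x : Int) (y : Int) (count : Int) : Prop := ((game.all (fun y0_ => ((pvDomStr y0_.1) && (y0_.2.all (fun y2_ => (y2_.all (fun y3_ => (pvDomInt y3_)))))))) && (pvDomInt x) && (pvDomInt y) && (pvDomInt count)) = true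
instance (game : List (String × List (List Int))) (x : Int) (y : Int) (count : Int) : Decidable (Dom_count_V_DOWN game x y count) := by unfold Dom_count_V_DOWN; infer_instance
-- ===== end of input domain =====

-- B replaces A's tail recursion over a redundant 3x3 window scan by a single iterative
-- while-loop walking down the column (same guard order, same values); objective: simpler.


-- ===== PORT A =====
-- game["currentGame"] (Pre_ guarantees the key is present)
def pvGrid (game : List (String × List (List Int))) : List (List Int) :=
  (PySem.Dict.get? (PySem.Dict.mk game) "currentGame").getD []

-- the big if-condition of A's inner loop body, for window indices i, j
def pvCondA (g : List (List Int)) (x y i j : Int) : Bool :=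
  decide (0 ≤ i) && decide (i < (g.length : Int)) &&
  decide (0 ≤ j) && decide (j < (((PySem.List.pyGet? g 0).getD []).length : Int)) &&
  (i == y + 1 && j == x) &&
  (PySem.List.pyGet? ((PySem.List.pyGet? g i).getD []) j == PySem.List.pyGet? ((PySem.List.pyGet? g y).getD []) x)

-- the double loop 'for i in range(y-1,y+2): for j in range(x-1,x+2)' as the flattened
-- list of visited (i, j) pairs; the first pair passing the condition triggers the
-- recursive call (the loop returns there), otherwise final_count (= count) is returned
theorem pvCondA_bounds {g : List (List Int)} {x y i j : Int}
    (h : pvCondA g x y i j = true) : i = y + 1 ∧ i < (g.length : Int) := by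
  simp [pvCondA] at h
  obtain ⟨⟨⟨⟨⟨_, h2⟩, _⟩, _⟩, hi, _⟩, _⟩ := h
  exact ⟨hi, h2⟩

def count_V_DOWN (game : List (String × List (List Int))) (x : Int) (y : Int) (count : Int) : Int :=
  match h : ((PySem.List.pyRange (y - 1) (y + 2) 1).flatMap
      (fun i => (PySem.List.pyRange (x - 1) (x + 2) 1).map (fun j => (i, j)))).find?
      (fun p => pvCondA (pvGrid game) x y p.1 p.2) with
  | some p => count_V_DOWN game p.2 p.1 (count + 1)
  | none => count
termination_by (((pvGrid game).length : Int) - y).toNat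
decreasing_by
  have hc := List.find?_some h
  have := pvCondA_bounds hc
  omega

-- ===== PORT B =====
-- the while-loop of B: while 0 <= y+1 < rows and 0 <= x < cols and grid[y+1][x] == grid[y][x]
def pvAltLoop (g : List (List Int)) (rows cols : Int) (x y count : Int) : Int :=
  if h : 0 ≤ y + 1 ∧ y + 1 < rows ∧ 0 ≤ x ∧ x < cols ∧
      (PySem.List.pyGet? ((PySem.List.pyGet? g (y + 1)).getD []) x
        == PySem.List.pyGet? ((PySem.List.pyGet? g y).getD []) x) = true
  then pvAltLoop g rows cols x (y + 1) (count + 1)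
  else count
termination_by (rows - y).toNat
decreasing_by omega

def count_V_DOWN_alt (game : List (String × List (List Int))) (x : Int) (y : Int) (count : Int) : Int :=
  let g := pvGrid game
  let rows : Int := g.length
  let cols : Int := if rows ≠ 0 then (((PySem.List.pyGet? g 0).getD []).length : Int) else 0
  pvAltLoop g rows cols x y count

-- ===== PRECONDITION & SPEC =====
-- Pre_ excludes games whose dict lacks the "currentGame" key (A raises KeyError there
-- except when y <= -2, where short-circuiting lets A return count while B's hoisted
-- grid lookup raises KeyError) and
-- ragged grids with the (y+1, x) probe inside row 0's bounds, on which A can index past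
-- a short row (IndexError); on some such ragged inputs A still returns (see the cite) and
-- B agrees there, but no closed-form condition separates them from the raising ones.
def Pre_count_V_DOWN (game : List (String × List (List Int))) (x : Int) (y : Int) (count : Int) : Prop :=
  (PySem.Dict.get? (PySem.Dict.mk game) "currentGame").isSome = true ∧
  ((∀ r ∈ pvGrid game, r.length = ((pvGrid game).headD []).length) ∨
   ¬(0 ≤ y + 1 ∧ y + 1 < ((pvGrid game).length : Int) ∧ 0 ≤ x ∧
     x < ((((pvGrid game).headD []).length : Int))))
instance (game : List (String × List (List Int))) (x : Int) (y : Int) (count : Int) : Decidable (Pre_count_V_DOWN game x y count) := by unfold Pre_count_V_DOWN; infer_instance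

def pvWitness_count_V_DOWN : (List (String × List (List Int))) × Int × Int × Int :=
  ([("currentGame", [[1, 0], [1, 0], [1, 2]])], 0, 0, 1)

def Spec_count_V_DOWN (game : List (String × List (List Int))) (x : Int) (y : Int) (count : Int) (out : Int) : Prop := out = count_V_DOWN_alt game x y count
instance (game : List (String × List (List Int))) (x : Int) (y : Int) (count : Int) (out : Int) : Decidable (Spec_count_V_DOWN game x y count out) := by unfold Spec_count_V_DOWN; infer_instance

-- ===== CLAIM (what is proved, stated in full; the proofs are below) =====
def Claim_equal_count_V_DOWN : Prop := ∀ (game : List (String × List (List Int))) (x : Int) (y : Int) (count : Int), Dom_count_V_DOWN game x y count → Pre_count_V_DOWN game x y count → Spec_count_V_DOWN game x y count (count_V_DOWN game x y count)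

-- ===== LEMMAS AND PROOFS =====
-- the 3x3 window in loop order
theorem pvWindow_eq (x y : Int) :
    ((PySem.List.pyRange (y - 1) (y + 2) 1).flatMap
      (fun i => (PySem.List.pyRange (x - 1) (x + 2) 1).map (fun j => (i, j)))) =
    [(y-1, x-1), (y-1, x), (y-1, x+1), (y, x-1), (y, x), (y, x+1),
     (y+1, x-1), (y+1, x), (y+1, x+1)] := by
  have hr : ∀ a : Int, PySem.List.pyRange (a - 1) (a + 2) 1 = [a - 1, a, a + 1] := by
    intro a
    rw [PySem.List.pyRange_one_cons (by omega), PySem.List.pyRange_one_cons (by omega),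
        PySem.List.pyRange_one_cons (by omega), PySem.List.pyRange_one_eq_nil (by omega)]
    norm_num
  rw [hr y, hr x]
  simp [List.flatMap]

theorem pvCondA_false_of_ne {g : List (List Int)} {x y i j : Int}
    (h : i ≠ y + 1 ∨ j ≠ x) : pvCondA g x y i j = false := by
  simp [pvCondA]
  intro _ _ _ _ h5 h6
  rcases h with h | h
  · exact absurd h5 h
  · exact absurd h6 h

-- A's double loop finds exactly the (y+1, x) probe (all other window cells fail i==y+1 and j==x)
theorem pvFind_eq (g : List (List Int)) (x y : Int) :
    (((PySem.List.pyRange (y - 1) (y + 2) 1).flatMap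
      (fun i => (PySem.List.pyRange (x - 1) (x + 2) 1).map (fun j => (i, j)))).find?
      (fun p => pvCondA g x y p.1 p.2)) =
    (if pvCondA g x y (y + 1) x then some (y + 1, x) else none) := by
  rw [pvWindow_eq]
  simp only [List.find?]
  rw [pvCondA_false_of_ne (g := g) (x := x) (y := y) (i := y - 1) (j := x - 1) (Or.inl (by omega)),
      pvCondA_false_of_ne (g := g) (x := x) (y := y) (i := y - 1) (j := x) (Or.inl (by omega)),
      pvCondA_false_of_ne (g := g) (x := x) (y := y) (i := y - 1) (j := x + 1) (Or.inl (by omega)),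
      pvCondA_false_of_ne (g := g) (x := x) (y := y) (i := y) (j := x - 1) (Or.inl (by omega)),
      pvCondA_false_of_ne (g := g) (x := x) (y := y) (i := y) (j := x) (Or.inl (by omega)),
      pvCondA_false_of_ne (g := g) (x := x) (y := y) (i := y) (j := x + 1) (Or.inl (by omega)),
      pvCondA_false_of_ne (g := g) (x := x) (y := y) (i := y + 1) (j := x - 1) (Or.inr (by omega)),
      pvCondA_false_of_ne (g := g) (x := x) (y := y) (i := y + 1) (j := x + 1) (Or.inr (by omega))]
  cases h : pvCondA g x y (y + 1) x <;> simp


-- the two guards agree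
theorem pvGuard_iff (g : List (List Int)) (x y : Int) :
    (pvCondA g x y (y + 1) x = true) ↔
    (0 ≤ y + 1 ∧ y + 1 < (g.length : Int) ∧ 0 ≤ x ∧
      x < (if (g.length : Int) ≠ 0 then (((PySem.List.pyGet? g 0).getD []).length : Int) else 0) ∧
      (PySem.List.pyGet? ((PySem.List.pyGet? g (y + 1)).getD []) x
        == PySem.List.pyGet? ((PySem.List.pyGet? g y).getD []) x) = true) := by
  simp only [pvCondA, Bool.and_eq_true, decide_eq_true_eq, beq_iff_eq]
  constructor
  · intro ⟨⟨⟨⟨⟨h1, h2⟩, h3⟩, h4⟩, _, _⟩, heq⟩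
    refine ⟨h1, h2, h3, ?_, by simpa using heq⟩
    rw [if_pos (by omega : (g.length : Int) ≠ 0)]
    exact h4
  · intro ⟨h1, h2, h3, h4, h5⟩
    rw [if_pos (by omega : (g.length : Int) ≠ 0)] at h4
    exact ⟨⟨⟨⟨⟨h1, h2⟩, h3⟩, h4⟩, by simp⟩, by simpa using h5⟩

theorem pvA_eq_loop (game : List (String × List (List Int))) (x : Int) :
    ∀ (n : ℕ) (y count : Int), ((((pvGrid game).length : Int) - y).toNat = n) →
    count_V_DOWN game x y count =
      pvAltLoop (pvGrid game) ((pvGrid game).length : Int)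
        (if ((pvGrid game).length : Int) ≠ 0 then (((PySem.List.pyGet? (pvGrid game) 0).getD []).length : Int) else 0)
        x y count := by
  intro n
  induction n using Nat.strong_induction_on with
  | _ n ih =>
    intro y count hn
    rw [count_V_DOWN, pvAltLoop]
    split
    next p hf =>
      rw [pvFind_eq] at hf
      by_cases hc : pvCondA (pvGrid game) x y (y + 1) x
      · rw [if_pos hc] at hf
        obtain rfl : p = (y + 1, x) := by injection hf with h'; exact h'.symm
        have hg := (pvGuard_iff (pvGrid game) x y).mp hc
        have hlt : y + 1 < ((pvGrid game).length : Int) := hg.2.1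
        rw [dif_pos hg]
        exact ih _ (by omega) (y + 1) (count + 1) rfl
      · rw [if_neg hc] at hf
        exact absurd hf (by simp)
    next hf =>
      rw [pvFind_eq] at hf
      by_cases hc : pvCondA (pvGrid game) x y (y + 1) x
      · rw [if_pos hc] at hf
        exact absurd hf (by simp)
      · rw [dif_neg (fun hg => hc ((pvGuard_iff (pvGrid game) x y).mpr hg))]

-- ===== VERDICT (by name: the statement is the Claim_ definition above) =====
theorem count_V_DOWN_spec : Claim_equal_count_V_DOWN := by
  intro game x y count _ _
  unfold Spec_count_V_DOWN count_V_DOWN_alt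
  exact pvA_eq_loop game x _ y count rfl
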